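-- pv_equiv track=rewrite | github.com/Krockus/Python-DZ | hw01_normal.py | get_two_lists
-- ===== SOURCE A (Python) =====
-- def get_two_lists(origin) :
-- 	res1 = []
-- 	res2 = []
--
-- 	for num in range(len(origin)) :
--
-- 		el = origin[num]
-- 		first_occur = el in origin[:num]
-- 		if not first_occur :
-- 			res1.append(el)
-- 			second_occur = el in origin[num+1:]
-- 			if not second_occur :
-- 				res2.append(el)
-- 	res = [res1,res2]
-- 	return res
-- ===== SOURCE B (Python) =====
-- def get_two_lists(origin):
--     res1 = []
--     for x in origin:
--         if x not in res1:
--             res1.append(x)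
--     res2 = [x for x in res1 if origin.count(x) == 1]
--     return [res1, res2]
-- ===== Notes on version B (the rewrite author's own statement) =====
-- stated objective: simpler
-- what changed: B builds the unique-order list res1 in one direct membership pass over the elements and then derives res2 by filtering res1 with origin.count(x)==1, instead of A's index loop with two slice-membership tests interleaved.
import Mathlib
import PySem

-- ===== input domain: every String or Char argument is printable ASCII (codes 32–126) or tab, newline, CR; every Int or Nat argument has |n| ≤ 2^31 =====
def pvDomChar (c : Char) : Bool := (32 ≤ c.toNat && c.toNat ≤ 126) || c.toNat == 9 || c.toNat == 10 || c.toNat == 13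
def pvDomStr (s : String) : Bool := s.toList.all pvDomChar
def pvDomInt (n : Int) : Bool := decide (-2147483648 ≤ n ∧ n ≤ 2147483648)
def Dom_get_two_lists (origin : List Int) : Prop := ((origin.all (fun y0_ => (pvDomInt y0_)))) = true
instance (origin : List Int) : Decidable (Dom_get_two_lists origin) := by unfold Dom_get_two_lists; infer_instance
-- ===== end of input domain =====

-- B is simpler: one membership pass builds res1, then res2 is a separate filter of res1 by
-- origin.count(x) == 1, replacing A's index loop with two interleaved slice-membership tests.
-- Equivalence of return values is proved for all inputs (both functions are total).

-- ===== PORT A =====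
-- for num in range(len(origin)): el = origin[num]; first_occur = el in origin[:num]; ...
def get_two_lists (origin : List Int) : List (List Int) :=
  let st :=
    (PySem.List.pyRange 0 (origin.length : Int) 1).foldl
      (fun (st : List Int × List Int) num =>
        let el := PySem.List.pyGetD origin num 0
        let first_occur := el ∈ PySem.List.slice origin none (some num)
        if ¬ first_occur then
          let res1 := st.1 ++ [el]
          let second_occur := el ∈ PySem.List.slice origin (some (num + 1)) none
          if ¬ second_occur then (res1, st.2 ++ [el]) else (res1, st.2)
        else st)
      ([], [])
  [st.1, st.2]

-- ===== PORT B =====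
def get_two_lists_alt (origin : List Int) : List (List Int) :=
  let res1 := origin.foldl (fun acc x => if x ∈ acc then acc else acc ++ [x]) []
  let res2 := res1.filter (fun x => PySem.List.count origin x == 1)
  [res1, res2]

-- ===== PRECONDITION & SPEC =====
def Spec_get_two_lists (origin : List Int) (out : List (List Int)) : Prop := out = get_two_lists_alt origin
instance (origin : List Int) (out : List (List Int)) : Decidable (Spec_get_two_lists origin out) := by unfold Spec_get_two_lists; infer_instance

-- ===== CLAIM (what is proved, stated in full; the proofs are below) =====
def Claim_equal_get_two_lists : Prop := ∀ (origin : List Int), Dom_get_two_lists origin → Spec_get_two_lists origin (get_two_lists origin)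

-- ===== LEMMAS AND PROOFS =====

-- A's loop re-expressed structurally: `pre` is the already-processed prefix, `rest` the remainder.
def loopA : List Int → List Int → List Int × List Int → List Int × List Int
  | _, [], st => st
  | pre, x :: rs, st =>
      loopA (pre ++ [x])  rs
        (if x ∈ pre then st
         else if x ∈ rs then (st.1 ++ [x], st.2) else (st.1 ++ [x], st.2 ++ [x]))

-- first occurrences of `rest` relative to the set of elements of `pre`
def f1 : List Int → List Int → List Int
  | _, [] => []
  | pre, x :: rs => if x ∈ pre then f1 pre rs else x :: f1 (pre ++ [x]) rs

theorem f1_congr (rest : List Int) : ∀ pre pre' : List Int,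
    (∀ y, y ∈ pre ↔ y ∈ pre') → f1 pre rest = f1 pre' rest := by
  induction rest with
  | nil => intro pre pre' _; rfl
  | cons x rs ih =>
      intro pre pre' h
      simp only [f1]
      by_cases hx : x ∈ pre
      · rw [if_pos hx, if_pos ((h x).mp hx), ih pre pre' h]
      · rw [if_neg hx, if_neg (fun c => hx ((h x).mpr c))]
        congr 1
        exact ih _ _ (fun y => by simp [h y])

theorem loopA_eq (rest : List Int) : ∀ (pre s1 s2 : List Int) (c : Int → Bool),
    (∀ y, c y = (pre.count y + rest.count y == 1)) →
    loopA pre rest (s1, s2) = (s1 ++ f1 pre rest, s2 ++ (f1 pre rest).filter c) := by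
  induction rest with
  | nil => intro pre s1 s2 c _; simp [loopA, f1]
  | cons x rs ih =>
      intro pre s1 s2 c hc
      have hc' : ∀ y, c y = ((pre ++ [x]).count y + rs.count y == 1) := by
        intro y
        rw [hc y]
        simp [List.count_append, List.count_cons]
        by_cases hy : x = y
        · simp [hy]; omega
        · simp [hy]
      by_cases hx : x ∈ pre
      · have hf : f1 (pre ++ [x]) rs = f1 pre rs :=
          f1_congr rs _ _ (fun y => by simp; intro h; subst h; exact hx)
        simp only [loopA, if_pos hx, f1, ih _ s1 s2 c hc', hf]
      · have hcx : c x = decide (x ∉ rs) := by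
          rw [hc x]
          have : pre.count x = 0 := List.count_eq_zero.mpr hx
          simp [this]
          by_cases hr : x ∈ rs
          · simp [hr]; have := List.count_pos_iff.mpr hr; omega
          · simp [hr, List.count_eq_zero.mpr hr]
        simp only [loopA, if_neg hx, f1, List.filter_cons, hcx]
        by_cases hr : x ∈ rs
        · rw [if_pos hr]
          simp only [hr, decide_false, not_true, Bool.false_eq_true, if_false]
          rw [ih _ (s1 ++ [x]) s2 c hc']
          simp
        · rw [if_neg hr]
          simp only [hr, not_false_iff, decide_true, if_true]
          rw [ih _ (s1 ++ [x]) (s2 ++ [x]) c hc']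
          simp

theorem foldl_eq_f1 (rest : List Int) : ∀ (pre acc : List Int),
    (∀ y, y ∈ acc ↔ y ∈ pre) →
    rest.foldl (fun acc x => if x ∈ acc then acc else acc ++ [x]) acc = acc ++ f1 pre rest := by
  induction rest with
  | nil => intro pre acc _; simp [f1]
  | cons x rs ih =>
      intro pre acc h
      simp only [List.foldl_cons, f1]
      by_cases hx : x ∈ acc
      · rw [if_pos hx, if_pos ((h x).mp hx), ih pre acc h]
      · rw [if_neg hx, if_neg (fun c => hx ((h x).mpr c)),
            ih (pre ++ [x]) (acc ++ [x]) (fun y => by simp [h y])]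
        simp

-- the index loop of port A is the structural loopA
theorem idx_loop_eq_loopA (origin : List Int) : ∀ (a : Nat) (st : List Int × List Int),
    a ≤ origin.length →
    (PySem.List.pyRange (a : Int) (origin.length : Int) 1).foldl
      (fun (st : List Int × List Int) num =>
        let el := PySem.List.pyGetD origin num 0
        let first_occur := el ∈ PySem.List.slice origin none (some num)
        if ¬ first_occur then
          let res1 := st.1 ++ [el]
          let second_occur := el ∈ PySem.List.slice origin (some (num + 1)) none
          if ¬ second_occur then (res1, st.2 ++ [el]) else (res1, st.2)
        else st) st
    = loopA (origin.take a) (origin.drop a) st := by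
  intro a st ha
  induction h : origin.length - a generalizing a st with
  | zero =>
      have haeq : a = origin.length := by omega
      subst haeq
      rw [PySem.List.pyRange_one_eq_nil (le_refl _)]
      simp [loopA]
  | succ k ih =>
      have hlt : a < origin.length := by omega
      rw [PySem.List.pyRange_one_cons (by exact_mod_cast hlt)]
      simp only [List.foldl_cons]
      have hget : PySem.List.pyGetD origin (a : Int) 0 = origin[a] := by
        rw [PySem.List.pyGetD_eq_getElem origin 0 (Int.natCast_nonneg a) (by exact_mod_cast hlt)]
        simp
      have hsl1 : PySem.List.slice origin none (some (a : Int)) = origin.take a :=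
        PySem.List.slice_to_natCast origin a
      have hsl2 : PySem.List.slice origin (some ((a : Int) + 1)) none = origin.drop (a + 1) := by
        have : ((a : Int) + 1) = ((a + 1 : Nat) : Int) := by push_cast; ring
        rw [this, PySem.List.slice_from_natCast]
      have hdrop : origin.drop a = origin[a] :: origin.drop (a + 1) :=
        (List.drop_eq_getElem_cons (by exact_mod_cast hlt)).trans rfl
      have htake : origin.take (a + 1) = origin.take a ++ [origin[a]] := by
        rw [List.take_add_one]; simp [List.getElem?_eq_getElem hlt]
      have hcast : (a : Int) + 1 = ((a + 1 : Nat) : Int) := by push_cast; ring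
      rw [hcast, ih (a + 1) _ (by omega) (by omega)]
      conv_rhs => rw [hdrop]
      simp only [loopA, hget, hsl1, htake]
      by_cases h1 : origin[a] ∈ origin.take a
      · simp [h1]
      · by_cases h2 : origin[a] ∈ origin.drop (a + 1) <;> simp [h1, h2, hsl2]

-- ===== VERDICT (by name: the statement is the Claim_ definition above) =====
theorem get_two_lists_spec : Claim_equal_get_two_lists := by
  intro origin _
  unfold Spec_get_two_lists get_two_lists get_two_lists_alt
  have h0 := idx_loop_eq_loopA origin 0 ([], []) (Nat.zero_le _)
  simp only [Nat.cast_zero, List.take_zero, List.drop_zero] at h0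
  rw [h0, loopA_eq origin [] [] [] (fun y => PySem.List.count origin y == 1)
        (fun y => by simp [PySem.List.count])]
  rw [foldl_eq_f1 origin [] [] (fun y => by simp)]
  simp
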